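-- pv_equiv track=rewrite | github.com/cdccnleo/RQA2025 | scripts/performance_analysis.py | _analyze_complexity_distribution
-- ===== SOURCE A (Python) =====
-- from typing import Dict, List, Any
--
-- def _analyze_complexity_distribution(methods: List[Dict[str, Any]]) -> Dict[str, int]:
--     """分析复杂度分布"""
--     distribution = {
--         '1-5': 0,
--         '6-10': 0,
--         '11-15': 0,
--         '16-20': 0,
--         '21-30': 0,
--         '30+': 0
--     }
--
--     for method in methods:
--         complexity = method['complexity']
--         if complexity <= 5:
--             distribution['1-5'] += 1
--         elif complexity <= 10:
--             distribution['6-10'] += 1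
--         elif complexity <= 15:
--             distribution['11-15'] += 1
--         elif complexity <= 20:
--             distribution['16-20'] += 1
--         elif complexity <= 30:
--             distribution['21-30'] += 1
--         else:
--             distribution['30+'] += 1
--
--     return distribution
-- ===== SOURCE B (Python) =====
-- from typing import Dict, List, Any
--
-- BOUNDS = [5, 10, 15, 20, 30]
-- LABELS = ['1-5', '6-10', '11-15', '16-20', '21-30', '30+']
--
-- def _analyze_complexity_distribution(methods: List[Dict[str, Any]]) -> Dict[str, int]:
--     """分析复杂度分布 (cumulative counts at the bucket boundaries, then differences)"""
--     cum = [sum(1 for m in methods if m['complexity'] <= b) for b in BOUNDS] + [len(methods)]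
--     return {lab: hi - lo for lab, lo, hi in zip(LABELS, [0] + cum, cum)}
-- ===== Notes on version B (the rewrite author's own statement) =====
-- stated objective: alternative
-- what changed: Replaces A's single-pass six-way if/elif chain mutating a dict with a staged cumulative-count method: one counting pass per boundary giving cumulative counts [cnt<=5, cnt<=10, ..., cnt<=30, len], then the bucket counts are the adjacent differences, zipped with the labels.
import Mathlib
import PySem

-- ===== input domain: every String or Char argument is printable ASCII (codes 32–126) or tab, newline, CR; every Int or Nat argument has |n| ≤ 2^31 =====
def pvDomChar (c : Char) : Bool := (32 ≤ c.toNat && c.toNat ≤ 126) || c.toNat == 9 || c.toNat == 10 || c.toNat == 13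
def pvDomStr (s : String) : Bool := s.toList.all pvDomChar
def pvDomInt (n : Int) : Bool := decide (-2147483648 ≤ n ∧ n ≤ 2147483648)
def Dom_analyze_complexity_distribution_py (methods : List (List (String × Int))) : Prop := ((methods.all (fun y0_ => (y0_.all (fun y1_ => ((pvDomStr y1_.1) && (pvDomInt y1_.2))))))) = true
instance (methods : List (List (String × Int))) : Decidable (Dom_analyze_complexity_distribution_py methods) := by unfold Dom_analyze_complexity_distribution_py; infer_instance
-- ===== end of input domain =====

-- B replaces A's single-pass six-way if/elif dict bucketing by staged cumulative
-- counts at the bucket boundaries followed by adjacent differences (alternative algorithm).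


-- ===== PORT A =====
-- distribution = {'1-5': 0, …, '30+': 0}
def pvDistInit : PySem.Dict String Int :=
  ((((((PySem.Dict.empty.insert "1-5" 0).insert "6-10" 0).insert "11-15" 0).insert
      "16-20" 0).insert "21-30" 0).insert "30+" 0)

-- complexity = method['complexity']; KeyError is excluded by Pre_, getD 0 stands for the lookup
def pvKey (m : List (String × Int)) : Int := (PySem.Dict.mk m).getD "complexity" 0

-- one loop iteration: the if/elif chain, d[k] += 1 as insert
def pvStepA (d : PySem.Dict String Int) (method : List (String × Int)) : PySem.Dict String Int :=
  let complexity := pvKey method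
  if complexity ≤ 5 then d.insert "1-5" (d.getD "1-5" 0 + 1)
  else if complexity ≤ 10 then d.insert "6-10" (d.getD "6-10" 0 + 1)
  else if complexity ≤ 15 then d.insert "11-15" (d.getD "11-15" 0 + 1)
  else if complexity ≤ 20 then d.insert "16-20" (d.getD "16-20" 0 + 1)
  else if complexity ≤ 30 then d.insert "21-30" (d.getD "21-30" 0 + 1)
  else d.insert "30+" (d.getD "30+" 0 + 1)

def analyze_complexity_distribution_py (methods : List (List (String × Int))) : List (String × Int) :=
  (methods.foldl pvStepA pvDistInit).items

-- ===== PORT B =====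
def pvBounds : List Int := [5, 10, 15, 20, 30]
def pvLabels : List String := ["1-5", "6-10", "11-15", "16-20", "21-30", "30+"]

-- sum(1 for m in methods if m['complexity'] <= b)
def pvCntLe (methods : List (List (String × Int))) (b : Int) : Int :=
  methods.foldl (fun acc m => acc + if pvKey m ≤ b then 1 else 0) 0

-- cum = [sum(...) for b in BOUNDS] + [len(methods)];
-- {lab: hi - lo for lab, lo, hi in zip(LABELS, [0] + cum, cum)}
def analyze_complexity_distribution_py_alt (methods : List (List (String × Int))) : List (String × Int) :=
  let cum := pvBounds.map (pvCntLe methods) ++ [(methods.length : Int)]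
  (pvLabels.zip (((0 : Int) :: cum).zip cum)).map (fun p => (p.1, p.2.2 - p.2.1))

-- ===== PRECONDITION & SPEC =====
-- Pre_ excludes exactly the inputs where some method dict lacks the key 'complexity':
-- there Python A raises KeyError (and so does B).
def Pre_analyze_complexity_distribution_py (methods : List (List (String × Int))) : Prop :=
  ∀ m ∈ methods, m.any (fun p => p.1 == "complexity")

instance (methods : List (List (String × Int))) : Decidable (Pre_analyze_complexity_distribution_py methods) := by
  unfold Pre_analyze_complexity_distribution_py; infer_instance

def pvWitness_analyze_complexity_distribution_py : (List (List (String × Int))) :=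
  [[("complexity", 7)], [("complexity", 31)]]

def Spec_analyze_complexity_distribution_py (methods : List (List (String × Int))) (out : List (String × Int)) : Prop := out = analyze_complexity_distribution_py_alt methods
instance (methods : List (List (String × Int))) (out : List (String × Int)) : Decidable (Spec_analyze_complexity_distribution_py methods out) := by unfold Spec_analyze_complexity_distribution_py; infer_instance

-- ===== CLAIM (what is proved, stated in full; the proofs are below) =====
def Claim_equal_analyze_complexity_distribution_py : Prop := ∀ (methods : List (List (String × Int))), Dom_analyze_complexity_distribution_py methods → Pre_analyze_complexity_distribution_py methods → Spec_analyze_complexity_distribution_py methods (analyze_complexity_distribution_py methods)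

-- ===== LEMMAS AND PROOFS =====
-- the six disjoint bucket predicates
def pvQ0 (m : List (String × Int)) : Bool := decide (pvKey m ≤ 5)
def pvQ1 (m : List (String × Int)) : Bool := !decide (pvKey m ≤ 5) && decide (pvKey m ≤ 10)
def pvQ2 (m : List (String × Int)) : Bool := !decide (pvKey m ≤ 10) && decide (pvKey m ≤ 15)
def pvQ3 (m : List (String × Int)) : Bool := !decide (pvKey m ≤ 15) && decide (pvKey m ≤ 20)
def pvQ4 (m : List (String × Int)) : Bool := !decide (pvKey m ≤ 20) && decide (pvKey m ≤ 30)
def pvQ5 (m : List (String × Int)) : Bool := !decide (pvKey m ≤ 30)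

-- the invariant dict shape: fixed six keys in order, arbitrary counts
def pvMkD (c0 c1 c2 c3 c4 c5 : Int) : PySem.Dict String Int :=
  PySem.Dict.mk [("1-5", c0), ("6-10", c1), ("11-15", c2), ("16-20", c3), ("21-30", c4), ("30+", c5)]

theorem pvStepA_mkD (m : List (String × Int)) (c0 c1 c2 c3 c4 c5 : Int) :
    pvStepA (pvMkD c0 c1 c2 c3 c4 c5) m =
      pvMkD (c0 + if pvQ0 m then 1 else 0) (c1 + if pvQ1 m then 1 else 0)
            (c2 + if pvQ2 m then 1 else 0) (c3 + if pvQ3 m then 1 else 0)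
            (c4 + if pvQ4 m then 1 else 0) (c5 + if pvQ5 m then 1 else 0) := by
  simp only [pvStepA, pvQ0, pvQ1, pvQ2, pvQ3, pvQ4, pvQ5]
  by_cases h5 : pvKey m ≤ 5 <;> by_cases h10 : pvKey m ≤ 10 <;> by_cases h15 : pvKey m ≤ 15 <;>
    by_cases h20 : pvKey m ≤ 20 <;> by_cases h30 : pvKey m ≤ 30 <;>
    first
    | omega
    | simp [pvMkD, h5, h10, h15, h20, h30,
        PySem.Dict.insert, PySem.Dict.getD, PySem.Dict.get?]

theorem pvFoldA (ms : List (List (String × Int))) :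
    ∀ c0 c1 c2 c3 c4 c5 : Int,
      ms.foldl pvStepA (pvMkD c0 c1 c2 c3 c4 c5) =
        pvMkD (c0 + ms.countP pvQ0) (c1 + ms.countP pvQ1) (c2 + ms.countP pvQ2)
              (c3 + ms.countP pvQ3) (c4 + ms.countP pvQ4) (c5 + ms.countP pvQ5) := by
  induction ms with
  | nil => intro c0 c1 c2 c3 c4 c5; simp
  | cons m ms ih =>
      intro c0 c1 c2 c3 c4 c5
      simp only [List.foldl_cons, pvStepA_mkD, ih, List.countP_cons]
      congr 1 <;> · push_cast; split_ifs <;> omega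

-- sum(1 for … if p) = countP
theorem pvFoldl_count {α : Type} (p : α → Prop) [DecidablePred p] (ms : List α) :
    ∀ a : Int, ms.foldl (fun acc m => acc + if p m then 1 else 0) a
      = a + ms.countP (fun m => decide (p m)) := by
  induction ms with
  | nil => intro a; simp
  | cons m ms ih =>
      intro a
      simp only [List.foldl_cons, ih, List.countP_cons, decide_eq_true_eq]
      by_cases h : p m <;> simp [h] <;> omega

theorem pvCntLe_eq (ms : List (List (String × Int))) (b : Int) :
    pvCntLe ms b = ms.countP (fun m => decide (pvKey m ≤ b)) := by
  have := pvFoldl_count (fun m => pvKey m ≤ b) ms 0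
  simpa [pvCntLe] using this

-- splitting a count at a lower boundary
theorem pvCountP_split {α : Type} (p q : α → Bool) (h : ∀ a, p a = true → q a = true)
    (ms : List α) : ms.countP q = ms.countP p + ms.countP (fun a => !p a && q a) := by
  induction ms with
  | nil => simp
  | cons m ms ih =>
      simp only [List.countP_cons, ih]
      cases hp : p m <;> cases hq : q m <;> simp_all <;> omega

theorem pvCountP_compl {α : Type} (p : α → Bool) (ms : List α) :
    ms.length = ms.countP p + ms.countP (fun a => !p a) := by
  induction ms with
  | nil => simp
  | cons m ms ih =>
      simp only [List.countP_cons, List.length_cons, ih]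
      cases hp : p m <;> simp <;> omega

-- ===== VERDICT (by name: the statement is the Claim_ definition above) =====
theorem analyze_complexity_distribution_py_spec : Claim_equal_analyze_complexity_distribution_py := by
  intro ms _ _
  unfold Spec_analyze_complexity_distribution_py analyze_complexity_distribution_py analyze_complexity_distribution_py_alt
  have hinit : pvDistInit = pvMkD 0 0 0 0 0 0 := by decide
  rw [hinit, pvFoldA]
  have h5 := pvCntLe_eq ms 5
  have h10 := pvCntLe_eq ms 10
  have h15 := pvCntLe_eq ms 15
  have h20 := pvCntLe_eq ms 20
  have h30 := pvCntLe_eq ms 30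
  have s10 : ms.countP (fun m => decide (pvKey m ≤ 10)) = ms.countP (fun m => decide (pvKey m ≤ 5))
      + ms.countP (fun m => !decide (pvKey m ≤ 5) && decide (pvKey m ≤ 10)) :=
    pvCountP_split _ _ (by intro a ha; simp_all; omega) ms
  have s15 : ms.countP (fun m => decide (pvKey m ≤ 15)) = ms.countP (fun m => decide (pvKey m ≤ 10))
      + ms.countP (fun m => !decide (pvKey m ≤ 10) && decide (pvKey m ≤ 15)) :=
    pvCountP_split _ _ (by intro a ha; simp_all; omega) ms
  have s20 : ms.countP (fun m => decide (pvKey m ≤ 20)) = ms.countP (fun m => decide (pvKey m ≤ 15))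
      + ms.countP (fun m => !decide (pvKey m ≤ 15) && decide (pvKey m ≤ 20)) :=
    pvCountP_split _ _ (by intro a ha; simp_all; omega) ms
  have s30 : ms.countP (fun m => decide (pvKey m ≤ 30)) = ms.countP (fun m => decide (pvKey m ≤ 20))
      + ms.countP (fun m => !decide (pvKey m ≤ 20) && decide (pvKey m ≤ 30)) :=
    pvCountP_split _ _ (by intro a ha; simp_all; omega) ms
  have slen : ms.length = ms.countP (fun m => decide (pvKey m ≤ 30))
      + ms.countP (fun m => !decide (pvKey m ≤ 30)) :=
    pvCountP_compl _ ms
  simp only [pvBounds, pvLabels, List.map_cons, List.cons_append, List.nil_append,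
    List.zip_cons_cons, List.zip_nil_right, List.map]
  unfold pvQ0 pvQ1 pvQ2 pvQ3 pvQ4 pvQ5
  rw [h5, h10, h15, h20, h30] at *
  simp only [pvMkD, List.cons.injEq, Prod.mk.injEq, true_and, and_true]
  simp only [s10, s15, s20, s30]
  refine ⟨?_, ?_, ?_, ?_, ?_, ?_⟩ <;> omega
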